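-- pv_equiv track=rewrite | github.com/ReyBroncas/films_locate | main.py | get_location_name
-- ===== SOURCE A (Python) =====
-- def get_location_name(line):
--     """
--     Function extracts location name from string line
--     :param line: string
--     :return: string
--     """
--     output_list = []
--     line = line.split('\t')
--     for i in range(-1, -(len(line) + 1), -1):
--         if '(' in line[i]:
--             continue
--         elif not line[i]:
--             break
--         output_list.append(line[i])
--     return ' '.join(output_list).rstrip()
-- ===== SOURCE B (Python) =====
-- def get_location_name(line):
--     parts = line.split('\t')
--     last_empty = -1
--     for i, t in enumerate(parts):
--         if not t:
--             last_empty = i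
--     tail = parts[last_empty + 1:]
--     return ' '.join(t for t in reversed(tail) if '(' not in t).rstrip()
-- ===== Notes on version B (the rewrite author's own statement) =====
-- stated objective: idiomatic
-- what changed: A's single countdown loop with interleaved continue/break and negative indexing is replaced by three plain stages: a forward scan recording the last empty tab-field, a slice taking the suffix after it, and a filter over its reversal dropping parenthesis-containing fields.
import Mathlib
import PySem

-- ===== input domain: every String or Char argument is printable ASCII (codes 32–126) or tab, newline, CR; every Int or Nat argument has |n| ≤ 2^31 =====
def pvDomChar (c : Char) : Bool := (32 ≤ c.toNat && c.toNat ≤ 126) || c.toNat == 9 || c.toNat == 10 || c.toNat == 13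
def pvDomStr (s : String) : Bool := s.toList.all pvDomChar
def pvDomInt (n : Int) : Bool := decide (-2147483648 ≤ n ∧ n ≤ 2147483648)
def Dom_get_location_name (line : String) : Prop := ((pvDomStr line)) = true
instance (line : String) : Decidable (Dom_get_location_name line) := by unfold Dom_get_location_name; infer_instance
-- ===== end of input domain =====

-- B replaces A's interleaved continue/break countdown loop by: locate the last empty
-- tab-field, slice the suffix after it, filter '('-fields from its reversal (idiomatic).

-- ===== PORT A =====
-- the for-loop over range(-1, -(len+1), -1) with continue/break; indices are always in
-- range, so pyGetD with default "" is exact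
def pvLoopA (parts : List String) : List Int → List String → List String
  | [], acc => acc
  | i :: rest, acc =>
    let t := PySem.List.pyGetD parts i ""
    if PySem.Str.isIn "(" t then pvLoopA parts rest acc
    else if t == "" then acc
    else pvLoopA parts rest (acc ++ [t])

def get_location_name (line : String) : String :=
  let parts := (PySem.Str.split? line "\t").getD []
  PySem.Str.rstrip (PySem.Str.join " "
    (pvLoopA parts (PySem.List.pyRange (-1) (-((parts.length : Int) + 1)) (-1)) []))

-- ===== PORT B =====
def get_location_name_alt (line : String) : String :=
  let parts := (PySem.Str.split? line "\t").getD []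
  let lastEmpty := (PySem.List.enumerate parts 0).foldl
    (fun acc it => if it.2 == "" then it.1 else acc) (-1)
  let tail := PySem.List.slice parts (some (lastEmpty + 1)) none
  PySem.Str.rstrip (PySem.Str.join " "
    (tail.reverse.filter (fun t => !(PySem.Str.isIn "(" t))))

-- ===== PRECONDITION & SPEC =====
def Spec_get_location_name (line : String) (out : String) : Prop := out = get_location_name_alt line
instance (line : String) (out : String) : Decidable (Spec_get_location_name line out) := by unfold Spec_get_location_name; infer_instance

-- ===== CLAIM (what is proved, stated in full; the proofs are below) =====
def Claim_equal_get_location_name : Prop := ∀ (line : String), Dom_get_location_name line → Spec_get_location_name line (get_location_name line)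

-- ===== LEMMAS AND PROOFS =====

-- A's loop, read over the reversed field list
def pvAux : List String → List String
  | [] => []
  | t :: ts =>
    if PySem.Str.isIn "(" t then pvAux ts
    else if t == "" then []
    else t :: pvAux ts

-- the index list [c, c-1, ..., c-(n-1)]
def pvIdx (c : Int) : Nat → List Int
  | 0 => []
  | n + 1 => c :: pvIdx (c - 1) n

theorem pvLoopA_shift (t : String) (ts : List String) :
    ∀ (n : Nat) (c : Int) (acc : List String), c ≤ -1 → (n : Int) ≤ ts.length + c + 1 →
      pvLoopA (ts.reverse ++ [t]) (pvIdx (c - 1) n) acc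
        = pvLoopA ts.reverse (pvIdx c n) acc := by
  intro n
  induction n with
  | zero => intro c acc _ _; rfl
  | succ n ih =>
    intro c acc hc hn
    have hL : (0 : Int) < ts.length + c + 1 := by omega
    have e : PySem.List.pyGetD (ts.reverse ++ [t]) (c - 1) ""
        = PySem.List.pyGetD ts.reverse c "" := by
      obtain ⟨m, hm⟩ : ∃ m : Nat, c = -(m : Int) := ⟨(-c).toNat, by omega⟩
      subst hm
      have hm2 : -((m : Int)) - 1 = -(((m + 1 : Nat) : Int)) := by push_cast; omega
      rw [hm2,
        PySem.List.pyGetD_neg_natCast _ _ _ (by omega) (by simp; omega),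
        PySem.List.pyGetD_neg_natCast _ _ _ (by omega) (by simp; omega)]
      have hlt : (ts.reverse ++ [t]).length - (m + 1) < ts.reverse.length := by
        simp; omega
      rw [List.getElem_append_left hlt]
      congr 1
      simp
    simp only [pvIdx, pvLoopA, e]
    split_ifs with h1 h2
    · exact ih (c - 1) acc (by omega) (by omega)
    · rfl
    · exact ih (c - 1) _ (by omega) (by omega)

theorem pvLoopA_eq_aux : ∀ (rev : List String) (acc : List String),
    pvLoopA rev.reverse (pvIdx (-1) rev.length) acc = acc ++ pvAux rev := by
  intro rev
  induction rev with
  | nil => intro acc; simp [pvLoopA, pvAux, pvIdx]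
  | cons t ts ih =>
    intro acc
    have hrev : (t :: ts).reverse = ts.reverse ++ [t] := by simp
    rw [hrev]
    simp only [List.length_cons, pvIdx, pvLoopA, PySem.List.pyGetD_neg_one_append_singleton]
    have hsh : ∀ acc', pvLoopA (ts.reverse ++ [t]) (pvIdx (-2) ts.length) acc'
        = pvLoopA ts.reverse (pvIdx (-1) ts.length) acc' := by
      intro acc'
      have : (-2 : Int) = -1 - 1 := by omega
      rw [this]
      exact pvLoopA_shift t ts ts.length (-1) acc' (by omega) (by omega)
    simp only [pvAux]
    split_ifs with h1 h2
    · rw [show (-1 : Int) - 1 = -2 by omega, hsh acc, ih acc]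
    · simp
    · rw [show (-1 : Int) - 1 = -2 by omega, hsh (acc ++ [t]), ih (acc ++ [t])]
      simp

theorem pvPyRange_eq : ∀ (n : Nat) (c : Int),
    PySem.List.pyRange c (c - n) (-1) = pvIdx c n := by
  intro n
  induction n with
  | zero => intro c; simp [pvIdx, PySem.List.pyRange_neg_one_eq_nil]
  | succ n ih =>
    intro c
    rw [PySem.List.pyRange_neg_one_cons (by push_cast; omega)]
    have : c - ((n : Int) + 1) = (c - 1) - n := by ring
    push_cast
    rw [this, ih (c - 1)]
    rfl

theorem pvAux_eq_takeWhile_filter : ∀ (l : List String),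
    pvAux l = (l.takeWhile (fun t => !(t == ""))).filter (fun t => !(PySem.Str.isIn "(" t)) := by
  intro l
  induction l with
  | nil => rfl
  | cons t ts ih =>
    by_cases he : t = ""
    · subst he
      have h0 : PySem.Chars.isIn ['('] ([] : List Char) = false := by decide
      simp [pvAux, List.takeWhile, h0]
    · have hb : (t == "") = false := beq_eq_false_iff_ne.mpr he
      by_cases hp : PySem.Chars.isIn ['('] t.toList = true
      · simp [pvAux, List.takeWhile, hb, ih, hp]
      · simp [pvAux, List.takeWhile, hb, ih, hp]

def pvLE (parts : List String) : Int :=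
  (PySem.List.enumerate parts 0).foldl (fun acc it => if it.2 == "" then it.1 else acc) (-1)

theorem pvEnumerate_append_singleton {α : Type} (xs : List α) (x : α) : ∀ (s : Int),
    PySem.List.enumerate (xs ++ [x]) s = PySem.List.enumerate xs s ++ [(s + xs.length, x)] := by
  induction xs with
  | nil => intro s; simp [PySem.List.enumerate_cons, PySem.List.enumerate_nil]
  | cons y ys ih =>
    intro s
    simp only [List.cons_append, PySem.List.enumerate_cons, ih (s + 1), List.length_cons]
    have : s + 1 + (ys.length : Int) = s + ((ys.length : Int) + 1) := by omega
    simp [this]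

theorem pvFold_lb : ∀ (xs : List String) (s acc : Int), acc ≤ s →
    acc ≤ (PySem.List.enumerate xs s).foldl (fun acc it => if it.2 == "" then it.1 else acc) acc := by
  intro xs
  induction xs with
  | nil => intro s acc _; simp [PySem.List.enumerate_nil]
  | cons x ys ih =>
    intro s acc h
    simp only [PySem.List.enumerate_cons, List.foldl_cons]
    by_cases hx : (x == "") = true
    · rw [if_pos hx]
      exact le_trans h (ih (s + 1) s (by omega))
    · rw [if_neg hx]
      exact ih (s + 1) acc (by omega)

theorem pvFold_ub : ∀ (xs : List String) (s acc : Int),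
    (PySem.List.enumerate xs s).foldl (fun acc it => if it.2 == "" then it.1 else acc) acc
      < s + xs.length
    ∨ (PySem.List.enumerate xs s).foldl (fun acc it => if it.2 == "" then it.1 else acc) acc
      = acc := by
  intro xs
  induction xs with
  | nil => intro s acc; right; simp [PySem.List.enumerate_nil]
  | cons x ys ih =>
    intro s acc
    simp only [PySem.List.enumerate_cons, List.foldl_cons, List.length_cons]
    rcases ih (s + 1) (if (x == "") = true then s else acc) with h | h
    · left; push_cast at *; omega
    · rw [h]
      by_cases hx : (x == "") = true
      · left; rw [if_pos hx]; push_cast; omega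
      · right; rw [if_neg hx]

theorem pvLE_bounds (parts : List String) : -1 ≤ pvLE parts ∧ pvLE parts < parts.length := by
  unfold pvLE
  have lb := pvFold_lb parts 0 (-1) (by omega)
  have ub := pvFold_ub parts 0 (-1)
  have hn : (0 : Int) ≤ (parts.length : Int) := by positivity
  constructor
  · exact lb
  · rcases ub with h | h
    · omega
    · omega

theorem pvLE_append_singleton (ps : List String) (t : String) :
    pvLE (ps ++ [t]) = if (t == "") = true then (ps.length : Int) else pvLE ps := by
  unfold pvLE
  rw [pvEnumerate_append_singleton ps t 0, List.foldl_append]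
  simp

theorem pvDrop_eq_takeWhile_reverse (parts : List String) :
    parts.drop (pvLE parts + 1).toNat = (parts.reverse.takeWhile (fun t => !(t == ""))).reverse := by
  induction parts using List.reverseRecOn with
  | nil => simp [pvLE, PySem.List.enumerate_nil]
  | append_singleton ps t ih =>
    rw [pvLE_append_singleton ps t]
    by_cases ht : (t == "") = true
    · rw [if_pos ht]
      have h1 : ((ps.length : Int) + 1).toNat = ps.length + 1 := by omega
      have h2 : (ps ++ [t]).length = ps.length + 1 := by simp
      rw [h1, List.drop_eq_nil_of_le (by omega)]
      simp only [List.reverse_append, List.reverse_singleton, List.singleton_append,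
        List.takeWhile_cons, ht]
      simp
    · rw [if_neg ht]
      have hb := pvLE_bounds ps
      have hlen : (pvLE ps + 1).toNat ≤ ps.length := by omega
      rw [List.drop_append_of_le_length hlen, ih]
      simp only [List.reverse_append, List.reverse_singleton, List.singleton_append,
        List.takeWhile_cons]
      simp [ht]

theorem pvMain (parts : List String) :
    PySem.Str.rstrip (PySem.Str.join " "
        (pvLoopA parts (PySem.List.pyRange (-1) (-((parts.length : Int) + 1)) (-1)) []))
      = PySem.Str.rstrip (PySem.Str.join " "
        ((PySem.List.slice parts (some (pvLE parts + 1)) none).reverse.filter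
          (fun t => !(PySem.Str.isIn "(" t)))) := by
  have hrange : PySem.List.pyRange (-1) (-((parts.length : Int) + 1)) (-1)
      = pvIdx (-1) parts.length := by
    have h : -((parts.length : Int) + 1) = (-1) - (parts.length : Int) := by ring
    rw [h, pvPyRange_eq parts.length (-1)]
  have hA : pvLoopA parts (pvIdx (-1) parts.length) []
      = (parts.reverse.takeWhile (fun t => !(t == ""))).filter
          (fun t => !(PySem.Str.isIn "(" t)) := by
    have h := pvLoopA_eq_aux parts.reverse []
    rw [List.reverse_reverse, List.length_reverse] at h
    rw [h, pvAux_eq_takeWhile_filter]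
    simp
  have hb := pvLE_bounds parts
  have hslice : PySem.List.slice parts (some (pvLE parts + 1)) none
      = parts.drop (pvLE parts + 1).toNat := by
    rw [PySem.List.slice_from parts (by omega : (0:Int) ≤ pvLE parts + 1)]
  rw [hrange, hA, hslice, pvDrop_eq_takeWhile_reverse, List.reverse_reverse]

-- ===== VERDICT (by name: the statement is the Claim_ definition above) =====
theorem get_location_name_spec : Claim_equal_get_location_name := by
  intro line _
  exact pvMain ((PySem.Str.split? line "\t").getD [])
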